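-- pv_equiv track=rewrite | github.com/tonybnya/dsa-sublime | sum_char_codes.py | sum_char_codes1
-- ===== SOURCE A (Python) =====
-- def sum_char_codes1(string: str) -> int:
-- 	"""
-- 	Sum the code points of each character of a string
-- 	Time Complexity: O(n)
--
-- 	:param string: a string
-- 	:return int: the sum of the code points
-- 	"""
-- 	s: int = 0
-- 	n: int = len(string)
--
-- 	for i in range(n):
-- 		s += ord(string[i])
--
-- 	for i in range(n):
-- 		s += ord(string[i])
--
-- 	return s
-- ===== SOURCE B (Python) =====
-- def sum_char_codes1(string: str) -> int:
--     total = sum(ord(c) for c in string)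
--     return total + total
-- ===== Notes on version B (the rewrite author's own statement) =====
-- stated objective: simpler
-- what changed: Replaces A's two identical index-based accumulation loops with one generator-sum over the characters, doubled once at the end.
import Mathlib
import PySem

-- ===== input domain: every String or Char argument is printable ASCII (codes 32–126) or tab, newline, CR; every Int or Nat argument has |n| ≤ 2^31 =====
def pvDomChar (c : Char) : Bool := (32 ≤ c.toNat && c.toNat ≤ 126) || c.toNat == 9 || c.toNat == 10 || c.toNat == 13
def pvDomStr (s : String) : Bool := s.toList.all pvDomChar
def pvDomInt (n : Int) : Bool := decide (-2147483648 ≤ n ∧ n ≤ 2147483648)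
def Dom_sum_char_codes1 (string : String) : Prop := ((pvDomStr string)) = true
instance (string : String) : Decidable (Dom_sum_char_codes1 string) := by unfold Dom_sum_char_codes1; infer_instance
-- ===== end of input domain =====

-- ===== PORT A =====
-- B collapses A's two identical accumulation loops into one pass whose sum is doubled (simpler).
def sum_char_codes1 (string : String) : Int :=
  let n : Int := PySem.Str.len string
  let s1 : Int := (PySem.List.pyRange 0 n 1).foldl
    (fun acc i => acc + ((PySem.List.pyGetD string.toList i ' ').toNat : Int)) 0
  let s2 : Int := (PySem.List.pyRange 0 n 1).foldl
    (fun acc i => acc + ((PySem.List.pyGetD string.toList i ' ').toNat : Int)) s1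
  s2

-- ===== PORT B =====
def sum_char_codes1_alt (string : String) : Int :=
  let total : Int := string.toList.foldl (fun acc c => acc + (c.toNat : Int)) 0
  total + total

-- ===== PRECONDITION & SPEC =====
def Spec_sum_char_codes1 (string : String) (out : Int) : Prop := out = sum_char_codes1_alt string
instance (string : String) (out : Int) : Decidable (Spec_sum_char_codes1 string out) := by unfold Spec_sum_char_codes1; infer_instance

-- ===== CLAIM (what is proved, stated in full; the proofs are below) =====
def Claim_equal_sum_char_codes1 : Prop := ∀ (string : String), Dom_sum_char_codes1 string → Spec_sum_char_codes1 string (sum_char_codes1 string)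

-- ===== LEMMAS AND PROOFS =====

-- ===== VERDICT (by name: the statement is the Claim_ definition above) =====
theorem sum_char_codes1_spec : Claim_equal_sum_char_codes1 := by
  intro string _
  unfold Spec_sum_char_codes1 sum_char_codes1 sum_char_codes1_alt
  simp only [PySem.Str.len_eq]
  rw [PySem.List.foldl_pyRange_zero_pyGetD' string.toList ' '
        (fun acc c => acc + (c.toNat : Int)) _,
      PySem.List.foldl_pyRange_zero_pyGetD' string.toList ' '
        (fun acc c => acc + (c.toNat : Int)) 0]
  simp [PySem.List.foldl_add]
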